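-- pv_equiv track=rewrite | github.com/fmwalle/Data_Stracture_excersise | week1/week2/matchingfellows.py | canMatchFellows
-- ===== SOURCE A (Python) =====
-- def canMatchFellows(skillMap: dict) -> bool:
--     setoflevels=set()
--
--     for levelSkill in skillMap.values():
--         if levelSkill not in setoflevels:
--             setoflevels.add(levelSkill)
--         else:
--             setoflevels.remove(levelSkill)
--
--     return len(setoflevels)==0
-- ===== SOURCE B (Python) =====
-- from collections import Counter
--
-- def canMatchFellows(skillMap: dict) -> bool:
--     return all(c % 2 == 0 for c in Counter(skillMap.values()).values())
-- ===== Notes on version B (the rewrite author's own statement) =====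
-- stated objective: idiomatic
-- what changed: Replaces the interleaved set-toggle loop (add if absent, remove if present, then test emptiness) with a Counter frequency table built in one pass followed by a separate all-counts-even parity check.
import Mathlib
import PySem

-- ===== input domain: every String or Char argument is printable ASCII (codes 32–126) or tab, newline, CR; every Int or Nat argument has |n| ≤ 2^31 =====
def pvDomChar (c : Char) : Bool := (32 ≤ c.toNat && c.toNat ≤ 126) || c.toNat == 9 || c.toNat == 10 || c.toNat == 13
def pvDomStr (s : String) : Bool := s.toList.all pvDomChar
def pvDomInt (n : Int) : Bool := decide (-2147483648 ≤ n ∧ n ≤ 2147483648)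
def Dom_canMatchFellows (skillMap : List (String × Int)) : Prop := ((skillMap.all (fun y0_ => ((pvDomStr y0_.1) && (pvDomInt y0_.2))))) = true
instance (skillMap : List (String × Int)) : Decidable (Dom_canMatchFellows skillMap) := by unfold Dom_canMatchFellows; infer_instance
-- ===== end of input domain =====

-- B replaces A's interleaved set-toggle loop with a Counter frequency table plus a
-- separate all-counts-even parity pass (idiomatic; same expected cost).

-- ===== PORT A =====
def canMatchFellows (skillMap : List (String × Int)) : Bool :=
  let setoflevels : PySem.Set Int :=
    (skillMap.map Prod.snd).foldl
      (fun s levelSkill =>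
        if !(PySem.Set.contains s levelSkill) then PySem.Set.add s levelSkill
        -- Python's .remove: the element is in the set on this branch, so discard is exact
        else PySem.Set.discard s levelSkill)
      PySem.Set.empty
  PySem.Set.len setoflevels == 0

-- ===== PORT B =====
def canMatchFellows_alt (skillMap : List (String × Int)) : Bool :=
  ((PySem.Dict.counter (skillMap.map Prod.snd)).values).all
    (fun c => PySem.Int.mod c 2 == 0)

-- ===== PRECONDITION & SPEC =====
def Spec_canMatchFellows (skillMap : List (String × Int)) (out : Bool) : Prop := out = canMatchFellows_alt skillMap
instance (skillMap : List (String × Int)) (out : Bool) : Decidable (Spec_canMatchFellows skillMap out) := by unfold Spec_canMatchFellows; infer_instance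

-- ===== CLAIM (what is proved, stated in full; the proofs are below) =====
def Claim_equal_canMatchFellows : Prop := ∀ (skillMap : List (String × Int)), Dom_canMatchFellows skillMap → Spec_canMatchFellows skillMap (canMatchFellows skillMap)

-- ===== LEMMAS AND PROOFS =====

-- A's toggle step
def pvTog (s : PySem.Set Int) (x : Int) : PySem.Set Int :=
  if !(PySem.Set.contains s x) then PySem.Set.add s x else PySem.Set.discard s x

theorem pvTog_nodup (s : PySem.Set Int) (x : Int) (h : s.Nodup) : (pvTog s x).Nodup := by
  unfold pvTog
  split
  · exact PySem.Set.nodup_add s x h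
  · exact PySem.Set.nodup_discard s x h

theorem mem_pvTog_fold (l : List Int) : ∀ (s : PySem.Set Int), s.Nodup → ∀ x : Int,
    (x ∈ l.foldl pvTog s ↔ ((x ∈ s) ↔ l.count x % 2 = 0)) := by
  induction l with
  | nil => intro s _ x; simp
  | cons a t ih =>
    intro s hs x
    have hs' : (pvTog s a).Nodup := pvTog_nodup s a hs
    rw [List.foldl_cons, ih (pvTog s a) hs' x]
    by_cases hxa : x = a
    · subst hxa
      have hc : (x :: t).count x = t.count x + 1 := by simp
      have hmem : (x ∈ pvTog s x) ↔ ¬ (x ∈ s) := by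
        unfold pvTog
        by_cases hin : x ∈ s <;> simp [hin, PySem.Set.mem_discard]
      rw [hc, hmem]
      by_cases hxs : x ∈ s <;> simp [hxs] <;> omega
    · have hc : (a :: t).count x = t.count x := by
        have hax : a ≠ x := fun h => hxa h.symm
        simp [hax]
      have hmem : (x ∈ pvTog s a) ↔ x ∈ s := by
        unfold pvTog
        by_cases hin : a ∈ s <;>
          simp [hin, hxa, PySem.Set.mem_discard]
      rw [hc, hmem]

theorem a_iff (vals : List Int) :
    ((vals.foldl pvTog PySem.Set.empty).length = 0 ↔ ∀ x ∈ vals, vals.count x % 2 = 0) := by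
  have hmem := mem_pvTog_fold vals PySem.Set.empty (by simp [PySem.Set.empty]) 
  rw [List.length_eq_zero_iff]
  constructor
  · intro hnil x hx
    have := hmem x
    rw [hnil] at this
    simp [PySem.Set.empty] at this
    exact this
  · intro h
    have hnone : ∀ x, x ∉ vals.foldl pvTog PySem.Set.empty := by
      intro x hx
      have hm := (hmem x).mp hx
      simp [PySem.Set.empty] at hm
      by_cases hv : x ∈ vals
      · have := h x hv; omega
      · rw [List.count_eq_zero_of_not_mem hv] at hm; omega
    cases hres : vals.foldl pvTog PySem.Set.empty with
    | nil => rfl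
    | cons y ys => exact absurd (hres ▸ List.mem_cons_self) (hnone y)

theorem b_iff (vals : List Int) :
    ((PySem.Dict.counter vals).values.all (fun c => PySem.Int.mod c 2 == 0) = true
      ↔ ∀ x ∈ vals, vals.count x % 2 = 0) := by
  have hv : (PySem.Dict.counter vals).values
      = (PySem.Dict.counter vals).items.map Prod.snd := rfl
  rw [hv, PySem.Dict.items_counter]
  simp only [List.map_map, List.all_eq_true, List.mem_map, Function.comp, beq_iff_eq]
  have hmod : ∀ n : Nat, PySem.Int.mod (n : Int) 2 = 0 ↔ n % 2 = 0 := by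
    intro n
    rw [show ((2:Int)) = ((2:Nat):Int) from rfl, PySem.Int.mod_natCast]
    omega
  constructor
  · intro h x hx
    have := h ((vals.count x : Int)) ⟨x, (PySem.Set.mem_ofList _ _).mpr hx, rfl⟩
    exact (hmod _).mp this
  · intro h c hc
    obtain ⟨x, hx, rfl⟩ := hc
    exact (hmod _).mpr (h x ((PySem.Set.mem_ofList _ _).mp hx))

-- ===== VERDICT (by name: the statement is the Claim_ definition above) =====
theorem canMatchFellows_spec : Claim_equal_canMatchFellows := by
  intro skillMap _
  unfold Spec_canMatchFellows canMatchFellows canMatchFellows_alt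
  rw [Bool.eq_iff_iff]
  have ha := a_iff (skillMap.map Prod.snd)
  have hb := b_iff (skillMap.map Prod.snd)
  simp only [PySem.Set.len, beq_iff_eq]
  constructor
  · intro h
    exact hb.mpr (ha.mp (by exact_mod_cast h))
  · intro h
    exact_mod_cast ha.mpr (hb.mp h)
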